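-- pv_equiv track=rewrite | github.com/cmmaya/polymarket_experiments | normalize data.py | build_slug_to_category
-- ===== SOURCE A (Python) =====
-- from typing import Dict, List, Tuple
--
-- def build_slug_to_category(
--     categories: Dict[str, List[str]],
--     priority: List[str],
-- ) -> Tuple[Dict[str, str], Dict[str, List[str]]]:
--     """
--     Returns:
--       - slug_to_category: chosen category per slug (resolves duplicates via priority)
--       - slug_to_all_categories: all categories each slug appears in (for reporting)
--     """
--     slug_to_all: Dict[str, List[str]] = {}
--     for cat, slugs in categories.items():
--         for s in slugs:
--             slug_to_all.setdefault(s, []).append(cat)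
--
--     prio_rank = {c: i for i, c in enumerate(priority)}
--     slug_to_category: Dict[str, str] = {}
--
--     for slug, cats in slug_to_all.items():
--         # choose category with lowest priority index
--         chosen = sorted(cats, key=lambda c: prio_rank.get(c, 10**9))[0]
--         slug_to_category[slug] = chosen
--
--     return slug_to_category, slug_to_all
-- ===== SOURCE B (Python) =====
-- from typing import Dict, List, Tuple
--
-- def build_slug_to_category(
--     categories: Dict[str, List[str]],
--     priority: List[str],
-- ) -> Tuple[Dict[str, str], Dict[str, List[str]]]:
--     # One pass: while grouping, keep the best (lowest-rank) category per slug
--     # with a running best_rank dict -- no second loop over slugs, no sorting.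
--     prio_rank = {c: i for i, c in enumerate(priority)}
--     BIG = 10 ** 9
--     slug_to_all: Dict[str, List[str]] = {}
--     best_rank: Dict[str, int] = {}
--     slug_to_category: Dict[str, str] = {}
--     for cat, slugs in categories.items():
--         r = prio_rank.get(cat, BIG)
--         for s in slugs:
--             slug_to_all.setdefault(s, []).append(cat)
--             b = best_rank.get(s)
--             if b is None or r < b:   # strict <: first-appended category wins ties
--                 best_rank[s] = r
--                 slug_to_category[s] = cat
--     return slug_to_category, slug_to_all
-- ===== Notes on version B (the rewrite author's own statement) =====
-- stated objective: alternative
-- what changed: A's second loop, which sorts each slug's category list by priority rank and takes the head, is fused into the grouping pass: B keeps a running best-rank and chosen category per slug (strict < so the first-appended category wins ties), so there is no second loop and no sorting.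
import Mathlib
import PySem

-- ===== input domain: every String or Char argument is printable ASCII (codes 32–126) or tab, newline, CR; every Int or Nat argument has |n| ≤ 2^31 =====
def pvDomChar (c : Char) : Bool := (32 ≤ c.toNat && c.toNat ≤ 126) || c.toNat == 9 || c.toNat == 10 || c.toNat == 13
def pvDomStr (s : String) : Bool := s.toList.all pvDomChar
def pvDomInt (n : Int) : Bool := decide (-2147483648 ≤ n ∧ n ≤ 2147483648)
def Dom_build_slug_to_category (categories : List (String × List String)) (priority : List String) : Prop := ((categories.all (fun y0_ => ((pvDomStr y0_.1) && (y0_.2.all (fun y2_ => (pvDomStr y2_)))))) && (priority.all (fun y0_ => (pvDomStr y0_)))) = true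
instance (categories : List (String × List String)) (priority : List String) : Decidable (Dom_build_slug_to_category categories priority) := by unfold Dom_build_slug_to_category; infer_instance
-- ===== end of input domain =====

-- B replaces A's second loop (per-slug sort by priority rank) with a single pass that
-- maintains a running best-rank and chosen category per slug; return value only, no mutation.

-- ===== PORT A =====
def build_slug_to_category (categories : List (String × List String)) (priority : List String) : (List (String × String)) × (List (String × List String)) :=
  let slugToAll : PySem.Dict String (List String) :=
    categories.foldl
      (fun d p => p.2.foldl (fun d s => d.modify s [] (fun l => l ++ [p.1])) d)
      PySem.Dict.empty
  let prioRank : PySem.Dict String Int :=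
    (PySem.List.enumerate priority).foldl (fun d q => d.insert q.2 q.1) PySem.Dict.empty
  let slugToCategory : PySem.Dict String String :=
    slugToAll.items.foldl
      (fun d p =>
        -- sorted(cats, key=…)[0]: every cats list in slugToAll is nonempty, so pyGet? is
        -- never none here; .getD "" only totalizes the expression
        d.insert p.1
          ((PySem.List.pyGet? (PySem.List.sorted p.2 (fun c => prioRank.getD c 1000000000)) 0).getD ""))
      PySem.Dict.empty
  (slugToCategory.items, slugToAll.items)

-- ===== PORT B =====
-- state: (slug_to_all, best_rank, slug_to_category)
def pvAltStep (r : Int) (cat : String)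
    (st : (PySem.Dict String (List String)) × (PySem.Dict String Int) × (PySem.Dict String String))
    (s : String) :
    (PySem.Dict String (List String)) × (PySem.Dict String Int) × (PySem.Dict String String) :=
  let all := st.1.modify s [] (fun l => l ++ [cat])
  match st.2.1.get? s with
  | none => (all, st.2.1.insert s r, st.2.2.insert s cat)
  | some b => if r < b then (all, st.2.1.insert s r, st.2.2.insert s cat) else (all, st.2.1, st.2.2)

def build_slug_to_category_alt (categories : List (String × List String)) (priority : List String) : (List (String × String)) × (List (String × List String)) :=
  let prioRank : PySem.Dict String Int :=
    (PySem.List.enumerate priority).foldl (fun d q => d.insert q.2 q.1) PySem.Dict.empty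
  let st :=
    categories.foldl
      (fun st p =>
        let r := prioRank.getD p.1 1000000000
        p.2.foldl (pvAltStep r p.1) st)
      ((PySem.Dict.empty : PySem.Dict String (List String)),
       (PySem.Dict.empty : PySem.Dict String Int),
       (PySem.Dict.empty : PySem.Dict String String))
  (st.2.2.items, st.1.items)

-- ===== PRECONDITION & SPEC =====
def Spec_build_slug_to_category (categories : List (String × List String)) (priority : List String) (out : (List (String × String)) × (List (String × List String))) : Prop := out = build_slug_to_category_alt categories priority
instance (categories : List (String × List String)) (priority : List String) (out : (List (String × String)) × (List (String × List String))) : Decidable (Spec_build_slug_to_category categories priority out) := by unfold Spec_build_slug_to_category; infer_instance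

-- ===== CLAIM (what is proved, stated in full; the proofs are below) =====
def Claim_equal_build_slug_to_category : Prop := ∀ (categories : List (String × List String)) (priority : List String), Dom_build_slug_to_category categories priority → Spec_build_slug_to_category categories priority (build_slug_to_category categories priority)

-- ===== LEMMAS AND PROOFS =====

-- first category of minimal rank in (a :: l)
def pvPick (rank : String → Int) (a : String) (l : List String) : String :=
  l.foldl (fun ch c => if rank c < rank ch then c else ch) a

def pvChoose (rank : String → Int) (l : List String) : String :=
  pvPick rank (l.headD "") l.tail

lemma pvChoose_singleton (rank : String → Int) (c : String) : pvChoose rank [c] = c := rfl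

lemma pvChoose_append (rank : String → Int) (l : List String) (c : String) (h : l ≠ []) :
    pvChoose rank (l ++ [c]) =
      if rank c < rank (pvChoose rank l) then c else pvChoose rank l := by
  obtain ⟨a, t, rfl⟩ := List.exists_cons_of_ne_nil h
  simp [pvChoose, pvPick, List.foldl_append]

lemma pvFoldInsertBy_cons (rank : String → Int) :
    ∀ (t : List String) (a : String) (acc : List String),
      ∃ r, t.foldl (fun acc x => PySem.List.insertBy (fun u v => decide (rank u < rank v)) x acc) (a :: acc)
            = pvPick rank a t :: r := by
  intro t
  induction t with
  | nil => intro a acc; exact ⟨acc, rfl⟩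
  | cons c t ih =>
    intro a acc
    by_cases h : rank c < rank a
    · have := ih c (a :: acc)
      simpa [PySem.List.insertBy, h, pvPick] using this
    · have := ih a (PySem.List.insertBy (fun u v => decide (rank u < rank v)) c acc)
      simpa [PySem.List.insertBy, h, pvPick] using this

lemma pvSortedHead (rank : String → Int) (l : List String) (h : l ≠ []) :
    (PySem.List.pyGet? (PySem.List.sorted l rank) 0).getD "" = pvChoose rank l := by
  obtain ⟨a, t, rfl⟩ := List.exists_cons_of_ne_nil h
  rw [PySem.List.sorted_eq_foldl_insertBy]
  obtain ⟨r, hr⟩ := pvFoldInsertBy_cons rank t a []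
  simp only [List.foldl_cons]
  rw [show PySem.List.insertBy (fun u v => decide (rank u < rank v)) a [] = [a] from rfl, hr]
  simp [PySem.List.pyGet?, PySem.List.pyIdx?, pvChoose]

-- the invariant B's loop maintains
def pvINV (rank : String → Int) (all : PySem.Dict String (List String))
    (best : PySem.Dict String Int) (chosen : PySem.Dict String String) : Prop :=
  all.keys.Nodup ∧ (∀ p ∈ all.items, p.2 ≠ []) ∧
  best.items = all.items.map (fun p => (p.1, rank (pvChoose rank p.2))) ∧
  chosen.items = all.items.map (fun p => (p.1, pvChoose rank p.2))

lemma pvMemItemsEq {ν : Type} (d : PySem.Dict String ν) (hnd : d.keys.Nodup) {s : String} {v w : ν}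
    (h1 : (s, v) ∈ d.items) (h2 : (s, w) ∈ d.items) : v = w := by
  have e1 := PySem.Dict.get?_of_mem_items d h1 hnd
  have e2 := PySem.Dict.get?_of_mem_items d h2 hnd
  rw [e1] at e2; exact Option.some.inj e2

lemma pvStep_inv (rank : String → Int) (c s : String)
    (all : PySem.Dict String (List String)) (best : PySem.Dict String Int)
    (chosen : PySem.Dict String String) (h : pvINV rank all best chosen) :
    pvINV rank (pvAltStep (rank c) c (all, best, chosen) s).1
      (pvAltStep (rank c) c (all, best, chosen) s).2.1
      (pvAltStep (rank c) c (all, best, chosen) s).2.2 := by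
  obtain ⟨hnd, hne, hbest, hchosen⟩ := h
  have hkeysb : best.keys = all.keys := by
    simp [PySem.Dict.keys, hbest, List.map_map]
  have hkeysc : chosen.keys = all.keys := by
    simp [PySem.Dict.keys, hchosen, List.map_map]
  unfold pvAltStep
  cases hm : best.get? s with
  | none =>
    have hsk : s ∉ all.keys := by
      have := (PySem.Dict.get?_eq_none_iff_not_mem_keys best s).mp hm
      rwa [hkeysb] at this
    have hca : all.contains s = false := by
      rw [PySem.Dict.contains_eq_decide_mem_keys]; simp [hsk]
    have hcb : best.contains s = false := (PySem.Dict.get?_eq_none_iff_contains best s).mp hm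
    have hcc : chosen.contains s = false := by
      rw [PySem.Dict.contains_eq_decide_mem_keys]; simp [hkeysc, hsk]
    have hmod : all.modify s [] (fun l => l ++ [c]) = all.insert s [c] := by
      simp [PySem.Dict.modify, PySem.Dict.getD_of_not_contains _ _ hca]
    simp only [hmod]
    refine ⟨?_, ?_, ?_, ?_⟩
    · rw [PySem.Dict.keys_insert_of_not_contains _ _ hca]
      simp [List.nodup_append, hnd]
      exact fun a ha he => hsk (he ▸ ha)
    · intro p hp
      rcases List.mem_append.mp ((PySem.Dict.items_insert_of_not_contains _ _ hca) ▸ hp) with h1 | h1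
      · exact hne p h1
      · simp at h1; simp [h1]
    · rw [PySem.Dict.items_insert_of_not_contains _ _ hcb,
         PySem.Dict.items_insert_of_not_contains _ _ hca, List.map_append, hbest]
      simp [pvChoose_singleton]
    · rw [PySem.Dict.items_insert_of_not_contains _ _ hcc,
         PySem.Dict.items_insert_of_not_contains _ _ hca, List.map_append, hchosen]
      simp [pvChoose_singleton]
  | some b =>
    have hcbs : best.contains s = true := by
      rw [PySem.Dict.contains_eq_isSome_get?, hm]; rfl
    have hska : s ∈ all.keys := by
      rw [← hkeysb]; exact (PySem.Dict.contains_iff_mem_keys best s).mp hcbs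
    obtain ⟨p0, hp0, hp01⟩ := List.mem_map.mp hska
    have hmem : (s, p0.2) ∈ all.items := by
      have : p0 = (s, p0.2) := by rw [← hp01]
      rwa [this] at hp0
    have huniq : ∀ q ∈ all.items, q.1 = s → q.2 = p0.2 := by
      intro q hq hq1
      refine pvMemItemsEq all hnd ?_ hmem
      have : q = (s, q.2) := by rw [← hq1]
      rwa [this] at hq
    have hcatsne : p0.2 ≠ [] := hne (s, p0.2) hmem
    have hb : b = rank (pvChoose rank p0.2) := by
      have h1 := PySem.Dict.mem_items_of_get?_eq_some best hm
      rw [hbest] at h1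
      obtain ⟨q, hq, hqe⟩ := List.mem_map.mp h1
      have hq1 : q.1 = s := congrArg Prod.fst hqe
      have hq2 : q.2 = p0.2 := huniq q hq hq1
      have hbv : rank (pvChoose rank q.2) = b := congrArg Prod.snd hqe
      rw [← hbv, hq2]
    have hcall : all.contains s = true := (PySem.Dict.contains_iff_mem_keys all s).mpr hska
    have hgetd : all.getD s [] = p0.2 := PySem.Dict.getD_of_mem_items all hmem hnd []
    have hmod : all.modify s [] (fun l => l ++ [c]) = all.insert s (p0.2 ++ [c]) := by
      simp [PySem.Dict.modify, hgetd]
    have hitem : (all.insert s (p0.2 ++ [c])).items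
        = all.items.map (fun q => if q.1 == s then (s, p0.2 ++ [c]) else q) :=
      PySem.Dict.items_insert_of_contains all _ hcall
    have hkeys' : (all.insert s (p0.2 ++ [c])).keys = all.keys :=
      PySem.Dict.keys_insert_of_contains all _ hcall
    have hnodup' : (all.insert s (p0.2 ++ [c])).keys.Nodup := by rw [hkeys']; exact hnd
    have hne' : ∀ q ∈ (all.insert s (p0.2 ++ [c])).items, q.2 ≠ [] := by
      rw [hitem]; intro q hq
      obtain ⟨q', hq', rfl⟩ := List.mem_map.mp hq
      by_cases h1 : q'.1 = s
      · simp [h1]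
      · simp [h1]; exact hne q' hq'
    have hchoose : pvChoose rank (p0.2 ++ [c])
        = if rank c < b then c else pvChoose rank p0.2 := by
      rw [pvChoose_append rank p0.2 c hcatsne, hb]
    by_cases hr : rank c < b
    · have hccs : chosen.contains s = true := by
        rw [PySem.Dict.contains_eq_decide_mem_keys, hkeysc]; simp [hska]
      simp only [hr, if_pos, hmod]
      refine ⟨hnodup', hne', ?_, ?_⟩
      · rw [PySem.Dict.items_insert_of_contains best _ hcbs, hbest, hitem,
           List.map_map, List.map_map]
        refine List.map_congr_left ?_
        intro q hq
        by_cases h1 : q.1 = s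
        · simp [Function.comp, h1, hchoose, hr]
        · simp [Function.comp, h1]
      · rw [PySem.Dict.items_insert_of_contains chosen _ hccs, hchosen, hitem,
           List.map_map, List.map_map]
        refine List.map_congr_left ?_
        intro q hq
        by_cases h1 : q.1 = s
        · simp [Function.comp, h1, hchoose, hr]
        · simp [Function.comp, h1]
    · simp only [hr, hmod, if_false]
      refine ⟨hnodup', hne', ?_, ?_⟩
      · rw [hbest, hitem, List.map_map]
        refine List.map_congr_left ?_
        intro q hq
        by_cases h1 : q.1 = s
        · simp [Function.comp, h1, huniq q hq h1, hchoose, hr]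
        · simp [Function.comp, h1]
      · rw [hchosen, hitem, List.map_map]
        refine List.map_congr_left ?_
        intro q hq
        by_cases h1 : q.1 = s
        · simp [Function.comp, h1, huniq q hq h1, hchoose, hr]
        · simp [Function.comp, h1]

lemma pvInner_inv (rank : String → Int) (c : String) (slugs : List String) :
    ∀ st : (PySem.Dict String (List String)) × (PySem.Dict String Int) × (PySem.Dict String String), pvINV rank st.1 st.2.1 st.2.2 →
      pvINV rank (slugs.foldl (pvAltStep (rank c) c) st).1
        (slugs.foldl (pvAltStep (rank c) c) st).2.1
        (slugs.foldl (pvAltStep (rank c) c) st).2.2 := by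
  induction slugs with
  | nil => intro st h; exact h
  | cons s slugs ih =>
    intro st h
    exact ih _ (pvStep_inv rank c s st.1 st.2.1 st.2.2 h)

lemma pvOuter_inv (prioRank : PySem.Dict String Int) (categories : List (String × List String)) :
    ∀ st : (PySem.Dict String (List String)) × (PySem.Dict String Int) × (PySem.Dict String String), pvINV (fun c => prioRank.getD c 1000000000) st.1 st.2.1 st.2.2 →
      pvINV (fun c => prioRank.getD c 1000000000)
        (categories.foldl (fun st p => let r := prioRank.getD p.1 1000000000; p.2.foldl (pvAltStep r p.1) st) st).1
        (categories.foldl (fun st p => let r := prioRank.getD p.1 1000000000; p.2.foldl (pvAltStep r p.1) st) st).2.1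
        (categories.foldl (fun st p => let r := prioRank.getD p.1 1000000000; p.2.foldl (pvAltStep r p.1) st) st).2.2 := by
  induction categories with
  | nil => intro st h; exact h
  | cons p categories ih =>
    intro st h
    exact ih _ (pvInner_inv (fun c => prioRank.getD c 1000000000) p.1 p.2 st h)

lemma pvAltStep_fst (r : Int) (c : String)
    (st : (PySem.Dict String (List String)) × (PySem.Dict String Int) × (PySem.Dict String String))
    (s : String) : (pvAltStep r c st s).1 = st.1.modify s [] (fun l => l ++ [c]) := by
  unfold pvAltStep
  cases st.2.1.get? s with
  | none => rfl
  | some b => by_cases hr : r < b <;> simp [hr]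

lemma pvInner_fst (r : Int) (c : String) (slugs : List String) :
    ∀ st : (PySem.Dict String (List String)) × (PySem.Dict String Int) × (PySem.Dict String String),
      (slugs.foldl (pvAltStep r c) st).1
        = slugs.foldl (fun d s => d.modify s [] (fun l => l ++ [c])) st.1 := by
  induction slugs with
  | nil => intro st; rfl
  | cons s slugs ih =>
    intro st
    simp only [List.foldl_cons]
    rw [ih, pvAltStep_fst]

-- B's slug_to_all component coincides with A's slug_to_all fold
lemma pvAlt_fst (prioRank : PySem.Dict String Int) (categories : List (String × List String)) :
    ∀ st : (PySem.Dict String (List String)) × (PySem.Dict String Int) × (PySem.Dict String String), (categories.foldl (fun st p => let r := prioRank.getD p.1 1000000000; p.2.foldl (pvAltStep r p.1) st) st).1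
      = categories.foldl (fun d p => p.2.foldl (fun d s => d.modify s [] (fun l => l ++ [p.1])) d) st.1 := by
  induction categories with
  | nil => intro st; rfl
  | cons p categories ih =>
    intro st
    simp only [List.foldl_cons]
    rw [ih]
    congr 1
    exact pvInner_fst (prioRank.getD p.1 1000000000) p.1 p.2 st

-- ===== VERDICT (by name: the statement is the Claim_ definition above) =====
lemma pvINV_empty (rank : String → Int) :
    pvINV rank PySem.Dict.empty PySem.Dict.empty PySem.Dict.empty := by
  refine ⟨?_, ?_, ?_, ?_⟩ <;> simp [PySem.Dict.empty, PySem.Dict.keys]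

theorem build_slug_to_category_spec : Claim_equal_build_slug_to_category := by
  intro categories priority _
  unfold Spec_build_slug_to_category build_slug_to_category build_slug_to_category_alt
  dsimp only
  set prioRank : PySem.Dict String Int :=
    (PySem.List.enumerate priority).foldl (fun d q => d.insert q.2 q.1) PySem.Dict.empty with hpr
  set rank : String → Int := fun c => prioRank.getD c 1000000000 with hrk
  set st := categories.foldl
      (fun st p => let r := prioRank.getD p.1 1000000000; p.2.foldl (pvAltStep r p.1) st)
      ((PySem.Dict.empty : PySem.Dict String (List String)),
       (PySem.Dict.empty : PySem.Dict String Int),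
       (PySem.Dict.empty : PySem.Dict String String)) with hst
  set all := categories.foldl
      (fun d p => p.2.foldl (fun d s => d.modify s [] (fun l => l ++ [p.1])) d)
      (PySem.Dict.empty : PySem.Dict String (List String)) with hall
  have hfst : st.1 = all := by
    rw [hst, hall]; exact pvAlt_fst prioRank categories _
  have hinv := pvOuter_inv prioRank categories
      (PySem.Dict.empty, PySem.Dict.empty, PySem.Dict.empty) (pvINV_empty rank)
  rw [← hst] at hinv
  obtain ⟨hnd, hne, _hbest, hchosen⟩ := hinv
  rw [hfst] at hnd hne hchosen
  have hfresh : (all.items.foldl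
        (fun d p => d.insert p.1
          ((PySem.List.pyGet? (PySem.List.sorted p.2 (fun c => prioRank.getD c 1000000000)) 0).getD ""))
        (PySem.Dict.empty : PySem.Dict String String)).items
      = PySem.Dict.empty.items ++ all.items.map (fun p => (p.1,
          (PySem.List.pyGet? (PySem.List.sorted p.2 (fun c => prioRank.getD c 1000000000)) 0).getD "")) := by
    exact PySem.Dict.items_foldl_insert_fresh all.items (fun p => p.1)
      (fun p => (PySem.List.pyGet? (PySem.List.sorted p.2 (fun c => prioRank.getD c 1000000000)) 0).getD "")
      PySem.Dict.empty (fun a _ => by simp [PySem.Dict.contains_empty]) hnd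
  refine Prod.ext ?_ ?_
  · dsimp only
    rw [hfresh, hchosen]
    have hemp : (PySem.Dict.empty : PySem.Dict String String).items = [] := rfl
    rw [hemp, List.nil_append]
    refine List.map_congr_left ?_
    intro p hp
    have := pvSortedHead rank p.2 (hne p hp)
    rw [hrk] at this
    rw [this]
  · dsimp only
    rw [hfst]
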